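-- pv_equiv track=rewrite | github.com/habeneyasu/operator-agent-sidekick | src/agents/graph.py | _format_steps_markdown
-- ===== SOURCE A (Python) =====
-- def _format_steps_markdown(text: str) -> str:
--     """Convert leading numbered steps to bolded bullet points:
--     '1. do X' -> '- **Step 1:** do X'
--     """
--     if not text:
--         return text
--     out_lines: list[str] = []
--     for line in text.splitlines():
--         stripped = line.lstrip()
--         # Match 'N. ' at line start (after optional leading spaces)
--         if stripped and stripped[0].isdigit():
--             i = 0
--             while i < len(stripped) and stripped[i].isdigit():
--                 i += 1
--             if i < len(stripped) and stripped[i] == ".":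
--                 # Extract step number and remainder (skip dot and optional space)
--                 step_num = stripped[:i]
--                 remainder = stripped[i + 1 :].lstrip()
--                 formatted = f"- **Step {step_num}:** {remainder}" if remainder else f"- **Step {step_num}:**"
--                 out_lines.append(formatted)
--                 continue
--         out_lines.append(line)
--     return "\n".join(out_lines)
-- ===== SOURCE B (Python) =====
-- def _format_steps_markdown(text: str) -> str:
--     """Convert leading numbered steps to bolded bullet points:
--     '1. do X' -> '- **Step 1:** do X'
--     """
--     n = len(text)
--     parts = []
--     i = 0
--     while i < n:
--         # locate the end of the current line
--         e = i
--         while e < n and text[e] != '\n' and text[e] != '\r':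
--             e += 1
--         # parse '  N. rest' directly inside the span [i, e)
--         p = i
--         while p < e and text[p] in ' \t':
--             p += 1
--         d = p
--         while d < e and '0' <= text[d] <= '9':
--             d += 1
--         if d > p and d < e and text[d] == '.':
--             r = d + 1
--             while r < e and text[r] in ' \t':
--                 r += 1
--             if r < e:
--                 parts.append('- **Step ' + text[p:d] + ':** ' + text[r:e])
--             else:
--                 parts.append('- **Step ' + text[p:d] + ':**')
--         else:
--             parts.append(text[i:e])
--         # consume the line terminator ('\r\n' counts as one)
--         if e < n:
--             e += 2 if text[e] == '\r' and e + 1 < n and text[e + 1] == '\n' else 1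
--             if e == n:
--                 break
--         i = e
--     return '\n'.join(parts)
-- ===== Notes on version B (the rewrite author's own statement) =====
-- stated objective: alternative
-- what changed: Replaces A's staged splitlines/lstrip/index-while pipeline over materialized lines with a single fused pointer scan over the raw text that locates line ends, skips whitespace, spans digits and consumes terminators in place.
import Mathlib
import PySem

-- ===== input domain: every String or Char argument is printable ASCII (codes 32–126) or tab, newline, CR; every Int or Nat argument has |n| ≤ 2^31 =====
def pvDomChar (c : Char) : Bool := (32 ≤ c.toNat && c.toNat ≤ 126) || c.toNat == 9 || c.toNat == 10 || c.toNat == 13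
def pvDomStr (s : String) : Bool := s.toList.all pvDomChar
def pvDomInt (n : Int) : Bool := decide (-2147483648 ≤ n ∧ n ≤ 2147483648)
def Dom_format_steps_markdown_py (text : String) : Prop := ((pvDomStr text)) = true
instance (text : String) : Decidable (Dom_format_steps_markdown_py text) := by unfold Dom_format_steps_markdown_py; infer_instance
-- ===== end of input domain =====

-- B replaces A's splitlines + per-line lstrip + digit-index while-loop with one fused pointer
-- scan over the raw text (manual line splitting and in-span parsing); alternative, same results.

-- ===== PORT A =====
-- the while loop 'i = 0; while i < len(stripped) and stripped[i].isdigit(): i += 1'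
def pvCountDigits : List Char → Nat
  | [] => 0
  | c :: rest => if PySem.Chars.isdigit c then pvCountDigits rest + 1 else 0

-- A's loop body for one line (stripped = line.lstrip())
def pvACore (line stripped : List Char) : List Char :=
  if stripped ≠ [] ∧ PySem.Chars.isdigit (stripped.headD ' ') then
    if pvCountDigits stripped < stripped.length ∧ stripped.getD (pvCountDigits stripped) ' ' = '.' then
      if PySem.Chars.lstrip (stripped.drop (pvCountDigits stripped + 1)) ≠ [] then
        "- **Step ".toList ++ stripped.take (pvCountDigits stripped) ++ ":** ".toList
          ++ PySem.Chars.lstrip (stripped.drop (pvCountDigits stripped + 1))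
      else
        "- **Step ".toList ++ stripped.take (pvCountDigits stripped) ++ ":**".toList
    else line
  else line

def pvALine (line : List Char) : List Char := pvACore line (PySem.Chars.lstrip line)

def format_steps_markdown_py (text : String) : String :=
  if text = "" then text
  else String.ofList (PySem.Chars.join ['\n'] ((PySem.Chars.splitlines text.toList).map pvALine))

-- ===== PORT B =====
-- inner while 'while e < n and text[e] != "\n" and text[e] != "\r"': returns (text[i:e], text[e:])
def pvBSpanLine : List Char → List Char × List Char
  | [] => ([], [])
  | c :: rest =>
    if c = '\n' ∨ c = '\r' then ([], c :: rest)
    else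
      let p := pvBSpanLine rest
      (c :: p.1, p.2)

theorem pvBSpanLine_snd_length (s : List Char) : (pvBSpanLine s).2.length ≤ s.length := by
  induction s with
  | nil => simp [pvBSpanLine]
  | cons c rest ih =>
    simp only [pvBSpanLine]
    split
    · simp
    · simpa using Nat.le_succ_of_le ih

-- 'while p < e and text[p] in " \t": p += 1'
def pvBSkipWs : List Char → List Char
  | [] => []
  | c :: rest => if c = ' ' ∨ c = '\t' then pvBSkipWs rest else c :: rest

-- 'while d < e and "0" <= text[d] <= "9": d += 1'  (returns (text[p:d], text[d:e]))
def pvBSpanDigits : List Char → List Char × List Char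
  | [] => ([], [])
  | c :: rest =>
    if '0' ≤ c ∧ c ≤ '9' then
      let p := pvBSpanDigits rest
      (c :: p.1, p.2)
    else ([], c :: rest)

-- the body of B's loop for the line span text[i:e)
def pvBFmtLine (line : List Char) : List Char :=
  let s := pvBSkipWs line
  let p := pvBSpanDigits s
  match p.2 with
  | '.' :: tail =>
    if p.1 ≠ [] then
      let r := pvBSkipWs tail
      if r ≠ [] then "- **Step ".toList ++ p.1 ++ ":** ".toList ++ r
      else "- **Step ".toList ++ p.1 ++ ":**".toList
    else line
  | _ => line

-- "e += 2 if text[e] == '\r' and e + 1 < n and text[e + 1] == '\n' else 1": input after the terminator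
def pvBDropTerm : List Char → List Char
  | [] => []
  | c :: r2 => if c = '\r' ∧ r2.headD ' ' = '\n' ∧ r2 ≠ [] then r2.tail else r2

theorem pvBDropTerm_length_lt (r : List Char) (h : r ≠ []) :
    (pvBDropTerm r).length < r.length := by
  cases r with
  | nil => exact absurd rfl h
  | cons d r2 =>
    simp only [pvBDropTerm]
    split
    · cases r2 <;> simp
    · simp

-- B's outer 'while i < n' loop: emit the formatted line, consume the terminator, stop at the end
def pvBGo : List Char → List (List Char)
  | [] => []
  | c :: rest =>
    let p := pvBSpanLine (c :: rest)
    pvBFmtLine p.1 :: (if hp : p.2 = [] then [] else pvBGo (pvBDropTerm p.2))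
  termination_by s => s.length
  decreasing_by
    have h1 := pvBSpanLine_snd_length (c :: rest)
    have h2 := pvBDropTerm_length_lt _ hp
    have hd : p = pvBSpanLine (c :: rest) := rfl
    rw [hd] at h2
    simp at h1 ⊢
    omega

def format_steps_markdown_py_alt (text : String) : String :=
  String.ofList (PySem.Chars.join ['\n'] (pvBGo text.toList))

-- ===== PRECONDITION & SPEC =====
def Spec_format_steps_markdown_py (text : String) (out : String) : Prop := out = format_steps_markdown_py_alt text
instance (text : String) (out : String) : Decidable (Spec_format_steps_markdown_py text out) := by unfold Spec_format_steps_markdown_py; infer_instance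

-- ===== CLAIM =====
def Claim_equal_format_steps_markdown_py : Prop := ∀ (text : String), Dom_format_steps_markdown_py text → Spec_format_steps_markdown_py text (format_steps_markdown_py text)

-- ===== LEMMAS AND PROOFS =====

-- raw line splitting with B's recursion structure (proof helper)
def pvSplitAux (s : List Char) (cur : List Char) : List (List Char) :=
  if s = [] ∧ cur = [] then []
  else
    (cur.reverse ++ (pvBSpanLine s).1) ::
      (if hp : (pvBSpanLine s).2 = [] then [] else pvSplitAux (pvBDropTerm (pvBSpanLine s).2) [])
  termination_by s.length
  decreasing_by
    have h1 := pvBSpanLine_snd_length s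
    have h2 := pvBDropTerm_length_lt _ hp
    omega

def pvSplitRest (r : List Char) : List (List Char) :=
  if r = [] then [] else pvSplitAux (pvBDropTerm r) []

theorem pvSplitRest_nil : pvSplitRest [] = [] := by simp [pvSplitRest]

theorem pvBDropTerm_crlf (r2 : List Char) : pvBDropTerm ('\r' :: '\n' :: r2) = r2 := by
  simp [pvBDropTerm]

theorem pvBDropTerm_cons (d : Char) (r2 : List Char)
    (hne : ∀ x : List Char, d :: r2 ≠ '\r' :: '\n' :: x) :
    pvBDropTerm (d :: r2) = r2 := by
  rw [pvBDropTerm, if_neg]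
  rintro ⟨h1, h2, h3⟩
  obtain ⟨b, t, hbt⟩ := List.exists_cons_of_ne_nil h3
  rw [hbt] at h2
  simp only [List.headD_cons] at h2
  exact hne t (by rw [h1, hbt, h2])

theorem pvBDropTerm_subset (r : List Char) : ∀ x ∈ pvBDropTerm r, x ∈ r := by
  cases r with
  | nil => simp [pvBDropTerm]
  | cons d r2 =>
    simp only [pvBDropTerm]
    split
    · intro x hx
      exact List.mem_cons_of_mem _ (List.mem_of_mem_tail hx)
    · intro x hx
      exact List.mem_cons_of_mem _ hx

theorem pvSplitRest_crlf (r2 : List Char) :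
    pvSplitRest ('\r' :: '\n' :: r2) = pvSplitAux r2 [] := by
  rw [pvSplitRest, if_neg (by simp), pvBDropTerm_crlf]

theorem pvSplitRest_cons (d : Char) (r2 : List Char)
    (hne : ∀ x : List Char, d :: r2 ≠ '\r' :: '\n' :: x) :
    pvSplitRest (d :: r2) = pvSplitAux r2 [] := by
  rw [pvSplitRest, if_neg (by simp), pvBDropTerm_cons d r2 hne]

theorem pvSplitAux_nil (cur : List Char) :
    pvSplitAux [] cur = if cur = [] then [] else [cur.reverse] := by
  rw [pvSplitAux]
  by_cases hc : cur = []
  · simp [hc]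
  · rw [if_neg (by simp [hc]), if_neg hc]
    have h1 : pvBSpanLine [] = ([], []) := rfl
    rw [h1]
    simp

theorem pvSplitAux_ne (s cur : List Char) (h : s ≠ []) :
    pvSplitAux s cur = (cur.reverse ++ (pvBSpanLine s).1) :: pvSplitRest (pvBSpanLine s).2 := by
  rw [pvSplitAux, if_neg (by simp [h]), pvSplitRest]
  by_cases hp : (pvBSpanLine s).2 = []
  · rw [dif_pos hp, if_pos hp]
  · rw [dif_neg hp, if_neg hp]

theorem pvSplitAux_cons_cur (rest : List Char) (c : Char) (cur : List Char) :
    pvSplitAux rest (c :: cur) =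
      (cur.reverse ++ c :: (pvBSpanLine rest).1) :: pvSplitRest (pvBSpanLine rest).2 := by
  cases rest with
  | nil =>
    rw [pvSplitAux_nil, if_neg (by simp)]
    have h1 : pvBSpanLine [] = ([], []) := rfl
    rw [h1, pvSplitRest_nil]
    simp
  | cons a r =>
    rw [pvSplitAux_ne _ _ (by simp)]
    simp

theorem pvBSpanLine_append (s : List Char) :
    (pvBSpanLine s).1 ++ (pvBSpanLine s).2 = s := by
  induction s with
  | nil => rfl
  | cons c rest ih =>
    simp only [pvBSpanLine]
    split
    · rfl
    · simpa using ih

theorem pvBSpanLine_fst_mem (s : List Char) :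
    ∀ c ∈ (pvBSpanLine s).1, c ∈ s ∧ c ≠ '\n' ∧ c ≠ '\r' := by
  induction s with
  | nil => simp [pvBSpanLine]
  | cons a rest ih =>
    simp only [pvBSpanLine]
    split
    · simp
    · rename_i h
      intro c hc
      simp only [List.mem_cons] at hc
      rcases hc with rfl | hc
      · exact ⟨List.mem_cons_self, not_or.mp h⟩
      · obtain ⟨h1, h2⟩ := ih c hc
        exact ⟨List.mem_cons_of_mem _ h1, h2⟩

theorem pvBSpanLine_snd_mem (s : List Char) :
    ∀ c ∈ (pvBSpanLine s).2, c ∈ s := by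
  intro c hc
  rw [← pvBSpanLine_append s]
  exact List.mem_append_right _ hc

theorem pvCharToNat_eq (c d : Char) : (c = d) ↔ (c.toNat = d.toNat) :=
  ⟨fun h => by subst h; rfl, fun h => Char.ext (UInt32.toNat_inj.mp h)⟩

-- on domain chars that are not line breaks, Python isspace is exactly ' ' or tab
theorem pvIsspace_char (c : Char) (hd : pvDomChar c = true) (h1 : c ≠ '\n') (h2 : c ≠ '\r') :
    PySem.Chars.isspace c = (c = ' ' ∨ c = '\t' : Bool) := by
  have h10 : c.toNat ≠ 10 := fun h => h1 ((pvCharToNat_eq c '\n').mpr h)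
  have h13 : c.toNat ≠ 13 := fun h => h2 ((pvCharToNat_eq c '\r').mpr h)
  have hdom : ((32 ≤ c.toNat ∧ c.toNat ≤ 126) ∨ c.toNat = 9 ∨ c.toNat = 10) ∨ c.toNat = 13 := by
    have := hd
    simp only [pvDomChar, Bool.or_eq_true, Bool.and_eq_true, decide_eq_true_eq,
      beq_iff_eq] at this
    tauto
  have t32 : (' ').toNat = 32 := by decide
  have t9 : ('\t').toNat = 9 := by decide
  rw [Bool.eq_iff_iff]
  simp only [PySem.Chars.isspace, pvCharToNat_eq, t32, t9, Bool.or_eq_true, Bool.and_eq_true,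
    decide_eq_true_eq]
  omega

-- B's whitespace skip is lstrip on break-free domain lines
theorem pvBSkipWs_eq (l : List Char) (h : ∀ c ∈ l, pvDomChar c = true ∧ c ≠ '\n' ∧ c ≠ '\r') :
    pvBSkipWs l = PySem.Chars.lstrip l := by
  induction l with
  | nil => rfl
  | cons c rest ih =>
    obtain ⟨hd, h1, h2⟩ := h c List.mem_cons_self
    have hs := pvIsspace_char c hd h1 h2
    simp only [pvBSkipWs, PySem.Chars.lstrip, List.dropWhile, hs]
    by_cases hc : c = ' ' ∨ c = '\t'
    · simpa [hc] using ih (fun x hx => h x (List.mem_cons_of_mem _ hx))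
    · simp [hc]

theorem pvBSpanDigits_eq (s : List Char) :
    pvBSpanDigits s = (s.takeWhile PySem.Chars.isdigit, s.dropWhile PySem.Chars.isdigit) := by
  induction s with
  | nil => rfl
  | cons c rest ih =>
    have : ('0' ≤ c ∧ c ≤ '9') ↔ PySem.Chars.isdigit c = true := by
      simp [PySem.Chars.isdigit]
    simp only [pvBSpanDigits, List.takeWhile, List.dropWhile]
    by_cases h : PySem.Chars.isdigit c <;> simp [h, ih, this]

theorem pvCountDigits_eq (s : List Char) :
    pvCountDigits s = (s.takeWhile PySem.Chars.isdigit).length := by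
  induction s with
  | nil => rfl
  | cons c rest ih =>
    simp only [pvCountDigits, List.takeWhile]
    by_cases h : PySem.Chars.isdigit c <;> simp [h, ih]

-- the two per-line computations agree on break-free domain lines
theorem pvLine_eq (l : List Char) (h : ∀ c ∈ l, pvDomChar c = true ∧ c ≠ '\n' ∧ c ≠ '\r') :
    pvBFmtLine l = pvALine l := by
  unfold pvBFmtLine pvALine pvACore
  dsimp only
  rw [pvBSkipWs_eq l h, pvBSpanDigits_eq, pvCountDigits_eq]
  set st := PySem.Chars.lstrip l with hst
  have hstsub : st.Sublist l := by
    rw [hst]; unfold PySem.Chars.lstrip; exact List.dropWhile_sublist _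
  have hstmem : ∀ c ∈ st, pvDomChar c = true ∧ c ≠ '\n' ∧ c ≠ '\r' :=
    fun c hc => h c (hstsub.subset hc)
  set ds := st.takeWhile PySem.Chars.isdigit with hds
  set rs := st.dropWhile PySem.Chars.isdigit with hrs
  have hsplit : ds ++ rs = st := by rw [hds, hrs]; exact List.takeWhile_append_dropWhile
  split
  · -- rs = '.' :: tail
    rename_i tail heq
    have heq2 : rs = '.' :: tail := heq
    dsimp only
    by_cases hdsne : ds = []
    · rw [if_neg (by simp [hdsne])]
      have hstv : st = '.' :: tail := by rw [← hsplit, hdsne, heq2]; rfl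
      rw [if_neg]
      rintro ⟨-, hdig⟩
      rw [hstv] at hdig
      simp only [List.headD_cons] at hdig
      exact absurd hdig (by decide)
    · obtain ⟨c, w, hcw⟩ := List.exists_cons_of_ne_nil hdsne
      have hcd : c ∈ st.takeWhile PySem.Chars.isdigit := by
        rw [← hds, hcw]; exact List.mem_cons_self
      have hcdig : PySem.Chars.isdigit c = true := List.mem_takeWhile_imp hcd
      have hstv : st = ds ++ '.' :: tail := by rw [← hsplit, heq2]
      have hsne : st ≠ [] := by rw [hstv, hcw]; simp
      have hhd : PySem.Chars.isdigit (st.headD ' ') = true := by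
        rw [hstv, hcw]; simpa using hcdig
      have hlen : ds.length < st.length := by rw [hstv]; simp
      have hget : st.getD ds.length ' ' = '.' := by
        rw [hstv, List.getD_eq_getElem?_getD, List.getElem?_append_right (le_refl _)]
        simp
      have htake : st.take ds.length = ds := by rw [hstv, List.take_left]
      have hdrop : st.drop (ds.length + 1) = tail := by
        have h2 : ds ++ '.' :: tail = (ds ++ ['.']) ++ tail := by simp
        have hl : ds.length + 1 = (ds ++ ['.']).length := by simp
        rw [hstv, h2, hl, List.drop_left]
      have htailmem : ∀ c ∈ tail, pvDomChar c = true ∧ c ≠ '\n' ∧ c ≠ '\r' := by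
        intro x hx
        apply hstmem
        rw [hstv]
        exact List.mem_append_right _ (List.mem_cons_of_mem _ hx)
      rw [if_pos hdsne, pvBSkipWs_eq tail htailmem]
      conv_rhs => rw [if_pos ⟨hsne, hhd⟩, if_pos ⟨hlen, hget⟩]
      rw [htake, hdrop]
  · -- rs is not '.' :: tail
    rename_i hno
    by_cases hg : st ≠ [] ∧ PySem.Chars.isdigit (st.headD ' ') = true
    · rw [if_pos hg, if_neg]
      rintro ⟨hlt, hget⟩
      have hrsne : rs ≠ [] := by
        intro hnil
        rw [← hsplit, hnil, List.append_nil] at hlt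
        exact absurd hlt (lt_irrefl _)
      obtain ⟨d, tl, hdtl⟩ := List.exists_cons_of_ne_nil hrsne
      have hgd : st.getD ds.length ' ' = d := by
        rw [← hsplit, hdtl, List.getD_eq_getElem?_getD,
          List.getElem?_append_right (le_refl _)]
        simp
      rw [hgd] at hget
      exact hno tl (by rw [hdtl, hget])
    · rw [if_neg hg]

-- pvBGo is pvSplitAux-then-format
theorem pvBGo_eq_split (s : List Char) (h : ∀ c ∈ s, pvDomChar c = true) :
    pvBGo s = (pvSplitAux s []).map pvALine := by
  suffices H : ∀ (n : Nat) (s : List Char), s.length ≤ n → (∀ c ∈ s, pvDomChar c = true) →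
      pvBGo s = (pvSplitAux s []).map pvALine from H s.length s le_rfl h
  intro n
  induction n with
  | zero =>
    intro s hl _
    have hs : s = [] := List.eq_nil_of_length_eq_zero (Nat.le_zero.mp hl)
    subst hs
    rw [pvSplitAux_nil, if_pos rfl]
    simp [pvBGo]
  | succ n ih =>
    intro s hl h
    cases s with
    | nil =>
      rw [pvSplitAux_nil, if_pos rfl]
      simp [pvBGo]
    | cons c rest =>
      have hsp := pvBSpanLine_snd_length (c :: rest)
      rw [pvBGo]
      conv_rhs => rw [pvSplitAux_ne _ _ (by simp)]
      simp only [List.reverse_nil, List.nil_append, List.map_cons]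
      congr 1
      · apply pvLine_eq
        intro x hx
        obtain ⟨hm, hn1, hn2⟩ := pvBSpanLine_fst_mem (c :: rest) x hx
        exact ⟨h x hm, hn1, hn2⟩
      · have hmem2 : ∀ x ∈ (pvBSpanLine (c :: rest)).2, pvDomChar x = true :=
          fun x hx => h x (pvBSpanLine_snd_mem _ x hx)
        by_cases hp : (pvBSpanLine (c :: rest)).2 = []
        · rw [dif_pos hp, hp, pvSplitRest_nil]
          rfl
        · rw [dif_neg hp, pvSplitRest, if_neg hp]
          apply ih
          · have h2 := pvBDropTerm_length_lt _ hp
            simp at hl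
            simp only [List.length_cons] at hsp
            omega
          · intro x hx
            exact hmem2 x (pvBDropTerm_subset _ x hx)

-- on domain chars, splitlines' break test is exactly '\n' or '\r'
theorem pvIsB_char (isB : Char → Bool)
    (hisB : ∀ c, isB c = (decide (c.toNat = 10) || decide (c.toNat = 13) || decide (c.toNat = 11) ||
      decide (c.toNat = 12) || decide (c.toNat = 28) || decide (c.toNat = 29) ||
      decide (c.toNat = 30) || decide (c.toNat = 133) || decide (c.toNat = 8232) ||
      decide (c.toNat = 8233)))
    (c : Char) (hd : pvDomChar c = true) :
    isB c = (c = '\n' ∨ c = '\r' : Bool) := by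
  have hdom : ((32 ≤ c.toNat ∧ c.toNat ≤ 126) ∨ c.toNat = 9 ∨ c.toNat = 10) ∨ c.toNat = 13 := by
    have := hd
    simp only [pvDomChar, Bool.or_eq_true, Bool.and_eq_true, decide_eq_true_eq,
      beq_iff_eq] at this
    tauto
  have t10 : ('\n').toNat = 10 := by decide
  have t13 : ('\r').toNat = 13 := by decide
  rw [hisB, Bool.eq_iff_iff]
  simp only [pvCharToNat_eq, t10, t13, Bool.or_eq_true, decide_eq_true_eq]
  omega

theorem pvGo_eq (isB : Char → Bool) :
    ∀ (n : Nat) (s : List Char), s.length ≤ n →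
      (∀ c ∈ s, isB c = (c = '\n' ∨ c = '\r' : Bool)) →
      ∀ (cur : List Char) (acc : List (List Char)),
        PySem.Chars.splitlines.go isB s cur acc = acc.reverse ++ pvSplitAux s cur := by
  intro n
  induction n with
  | zero =>
    intro s hl _ cur acc
    have hs : s = [] := List.eq_nil_of_length_eq_zero (Nat.le_zero.mp hl)
    subst hs
    rw [PySem.Chars.splitlines.go.eq_1, pvSplitAux_nil]
    by_cases hc : cur = [] <;> simp [hc, List.isEmpty_iff]
  | succ n ih =>
    intro s hl hB cur acc
    cases s with
    | nil =>
      rw [PySem.Chars.splitlines.go.eq_1, pvSplitAux_nil]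
      by_cases hc : cur = [] <;> simp [hc, List.isEmpty_iff]
    | cons c rest =>
      have hlr : rest.length ≤ n := by simpa using hl
      have hBr : ∀ x ∈ rest, isB x = (x = '\n' ∨ x = '\r' : Bool) :=
        fun x hx => hB x (List.mem_cons_of_mem _ hx)
      have hBc : isB c = (c = '\n' ∨ c = '\r' : Bool) := hB c List.mem_cons_self
      by_cases hcr : c = '\r'
      · subst hcr
        cases rest with
        | nil =>
          conv_rhs => rw [pvSplitAux_ne _ _ (by simp),
            show pvBSpanLine ['\r'] = ([], ['\r']) from by decide,
            pvSplitRest_cons _ _ (by intro x hx; simp at hx),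
            pvSplitAux_nil, if_pos rfl]
          rw [PySem.Chars.splitlines.go.eq_3 _ _ _ _ _ (by intro x h1 h2; simp at h2),
            if_pos (by rw [hBc]; decide),
            PySem.Chars.splitlines.go.eq_1]
          simp
        | cons b rest2 =>
          by_cases hb : b = '\n'
          · subst hb
            conv_rhs => rw [pvSplitAux_ne _ _ (by simp),
              show pvBSpanLine ('\r' :: '\n' :: rest2) = ([], '\r' :: '\n' :: rest2) from by
                rw [pvBSpanLine]; simp,
              pvSplitRest_crlf]
            rw [PySem.Chars.splitlines.go.eq_2,
              ih rest2 (by simp at hl; omega)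
                (fun x hx => hBr x (List.mem_cons_of_mem _ hx)) [] (cur.reverse :: acc)]
            simp
          · conv_rhs => rw [pvSplitAux_ne _ _ (by simp),
              show pvBSpanLine ('\r' :: b :: rest2) = ([], '\r' :: b :: rest2) from by
                rw [pvBSpanLine]; simp]
            rw [pvSplitRest_cons _ _ (by intro x hx; simp at hx; exact hb hx.1)]
            rw [PySem.Chars.splitlines.go.eq_3 _ _ _ _ _
                (by intro x h1 h2; injection h2 with h2a h2b; exact hb h2a),
              if_pos (by rw [hBc]; decide),
              ih (b :: rest2) (by simpa using hl) hBr [] (cur.reverse :: acc)]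
            simp
      · have hside : ∀ (x : List Char), c = '\r' → rest = '\n' :: x → False := by
          intro x h1 _; exact hcr h1
        rw [PySem.Chars.splitlines.go.eq_3 _ _ _ _ _ hside]
        by_cases hcn : c = '\n'
        · subst hcn
          conv_rhs => rw [pvSplitAux_ne _ _ (by simp),
            show pvBSpanLine ('\n' :: rest) = ([], '\n' :: rest) from by
              rw [pvBSpanLine]; simp]
          rw [pvSplitRest_cons _ _ (by intro x hx; simp at hx)]
          rw [if_pos (by rw [hBc]; decide),
            ih rest hlr hBr [] (cur.reverse :: acc)]
          simp
        · conv_rhs => rw [pvSplitAux_ne _ _ (by simp),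
            show pvBSpanLine (c :: rest) = (c :: (pvBSpanLine rest).1, (pvBSpanLine rest).2) from by
              rw [pvBSpanLine, if_neg (by simp [hcn, hcr])]]
          rw [if_neg (by rw [hBc]; simp [hcn, hcr]),
            ih rest hlr hBr (c :: cur) acc,
            pvSplitAux_cons_cur]

-- splitlines agrees with B's manual splitter on domain strings
theorem pvSplitlines_eq (s : List Char) (h : ∀ c ∈ s, pvDomChar c = true) :
    PySem.Chars.splitlines s = pvSplitAux s [] := by
  unfold PySem.Chars.splitlines
  rw [pvGo_eq _ s.length s le_rfl
    (fun c hc => pvIsB_char _ (fun _ => rfl) c (h c hc)) [] []]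
  simp

-- ===== VERDICT =====
theorem format_steps_markdown_py_spec : Claim_equal_format_steps_markdown_py := by
  intro text hdom
  unfold Spec_format_steps_markdown_py format_steps_markdown_py format_steps_markdown_py_alt
  have hall : ∀ c ∈ text.toList, pvDomChar c = true := by
    have := hdom
    unfold Dom_format_steps_markdown_py pvDomStr at this
    simpa [List.all_eq_true] using this
  by_cases he : text = ""
  · subst he
    rw [if_pos rfl]
    have h0 : ("" : String).toList = [] := by simp
    rw [h0]
    have h1 : pvBGo [] = [] := by rw [pvBGo]
    have h2 : PySem.Chars.join ['\n'] ([] : List (List Char)) = [] := rfl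
    rw [h1, h2]
  · rw [if_neg he, pvBGo_eq_split _ hall, pvSplitlines_eq _ hall]
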